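-- pv_equiv track=rewrite | github.com/OD1995/AdventOfCode2021 | Day18.py | deal_with_left_number
-- ===== SOURCE A (Python) =====
-- def deal_with_left_number(Cr,last_number_ix,left_num,last_A_ix):
--     if last_number_ix is not None:
--         lni = last_number_ix
--         ## First make sure the number is single digit
--         while Cr[lni-1] not in [",","["]:
--             lni -= 1
--         last_number = int(Cr[lni:last_number_ix+1])
--         new_last_number = last_number + left_num
--         extra_chars = len(str(new_last_number)) - len(str(last_number))
--         Cr = Cr[:lni] + str(new_last_number) + Cr[last_number_ix+1:]
--         return Cr,True,extra_chars,lni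
--     elif last_A_ix != 0:
--         ## Go backwards from last_A_ix to find last number
--         ix = last_A_ix
--         end_ix = False
--         while ix >= 0:
--             v = Cr[ix]
--             if not end_ix:
--                 if v.isnumeric():
--                     end_ix = ix
--             else:
--                 if v in [',','[']:
--                     break
--             ix -= 1
--         if end_ix:
--             last_number = int(Cr[ix+1:end_ix+1])
--             new_last_number = last_number + left_num
--             extra_chars = len(str(new_last_number)) - len(str(last_number))
--             Cr = Cr[:ix+1] + str(new_last_number) + Cr[end_ix+1:]
--             return Cr,True,extra_chars,ix
--         else:
--             return Cr,False,0,0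
--     return Cr,False,0,0
-- ===== SOURCE B (Python) =====
-- def deal_with_left_number(Cr, last_number_ix, left_num, last_A_ix):
--     # Single forward scan over the prefix that tracks the last digit run,
--     # instead of A's two separate backward scans.
--     if last_number_ix is not None:
--         end_ix = last_number_ix
--     elif last_A_ix > 0:
--         end_ix = last_A_ix
--     else:
--         return Cr, False, 0, 0
--     prefix = Cr[:end_ix + 1]
--     span = None
--     run_start = None
--     for i, ch in enumerate(prefix):
--         if ch.isdigit():
--             if run_start is None:
--                 run_start = i
--             span = (run_start, i + 1)
--         else:
--             run_start = None
--     if span is None: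
--         if last_number_ix is not None:
--             # branch 1 of the original never returns a no-op: with no number in
--             # the prefix there is nothing to add to
--             raise ValueError("no number ending at last_number_ix")
--         return Cr, False, 0, 0
--     lo, hi = span
--     old = int(prefix[lo:hi])
--     new = old + left_num
--     extra = len(str(new)) - len(str(old))
--     patched = Cr[:lo] + str(new) + Cr[hi:]
--     return patched, True, extra, (lo if last_number_ix is not None else lo - 1)
-- ===== Notes on version B (the rewrite author's own statement) =====
-- stated objective: simpler
-- what changed: A's two separate backward while-loop scans (one walking left to the run start, one state-machine scan hunting for the last number) are replaced by a single unified forward pass over the prefix that tracks the last digit run, with one shared splice-and-return path for both branches.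
-- intended difference: When the only number at or before last_A_ix ends at string index 0, A's `if end_ix:` truthiness test treats the found position 0 as 'not found' and A returns (Cr, False, 0, 0); B adds left_num to that number and returns the patched string with index -1, the intended 'add to the preceding number' behaviour. — e.g. on deal_with_left_number("7]", none, 1, 1): A returns ("7]", false, 0, 0), B returns ("8]", true, 0, -1)
-- outside the precondition, e.g. on deal_with_left_number('[5,6]', -2, 1, 0): A returns ('[5,7]', True, 0, -2), B returns ('[5,7]', True, 0, 3); on deal_with_left_number('[,+5]', 3, 1, 0): A returns ('[,6]', True, 0, 2), B returns ('[,+6]', True, 0, 3); on deal_with_left_number(' 5', None, 1, 1): A returns ('6', True, 0, -1), B returns (' 6', True, 0, 0)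
import Mathlib
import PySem

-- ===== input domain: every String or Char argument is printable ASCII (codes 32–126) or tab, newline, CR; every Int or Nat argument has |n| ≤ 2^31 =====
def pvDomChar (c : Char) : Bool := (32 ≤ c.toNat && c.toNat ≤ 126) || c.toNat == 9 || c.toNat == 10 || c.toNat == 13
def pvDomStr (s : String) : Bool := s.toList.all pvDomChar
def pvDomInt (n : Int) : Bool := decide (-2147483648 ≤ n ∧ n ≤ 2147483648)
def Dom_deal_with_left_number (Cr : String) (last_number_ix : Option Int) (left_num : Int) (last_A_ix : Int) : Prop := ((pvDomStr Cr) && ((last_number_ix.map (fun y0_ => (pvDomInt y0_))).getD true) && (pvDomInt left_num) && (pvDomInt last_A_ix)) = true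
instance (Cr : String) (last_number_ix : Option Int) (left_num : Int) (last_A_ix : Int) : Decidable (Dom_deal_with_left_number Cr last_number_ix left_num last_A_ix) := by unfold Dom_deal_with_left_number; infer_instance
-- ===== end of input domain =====

-- B replaces A's two hand-rolled backward scans by one forward pass that tracks the last digit
-- run of the prefix (objective: simpler, one unified code path; not claimed faster).

-- ===== PORT A =====

/-- `v in [",", "["]` -/
def pvSep (c : Char) : Bool := c = ',' || c = '['

/-- Python truthiness of A's `end_ix` variable (`False` or an int; note `0` is falsy). -/
def pvTruthy (e : Option Int) : Bool :=
  match e with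
  | none => false
  | some v => v != 0

/-- A's first while loop: `while Cr[lni-1] not in [",","["]: lni -= 1`.
`none` from `pyGet?` is Python's IndexError (outside `Pre_`); fuel suffices on `Pre_`. -/
def pvLoop1 (cl : List Char) (fuel : Nat) (lni : Int) : Int :=
  match fuel with
  | 0 => lni
  | f + 1 =>
    match PySem.List.pyGet? cl (lni - 1) with
    | none => lni            -- IndexError in Python (outside Pre_)
    | some c => if pvSep c then lni else pvLoop1 cl f (lni - 1)

/-- A's second while loop (`ix >= 0` scan with `end_ix`); returns (ix, end_ix) at exit/break. -/
def pvLoop2 (cl : List Char) (fuel : Nat) (ix : Int) (e : Option Int) : Int × Option Int :=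
  match fuel with
  | 0 => (ix, e)
  | f + 1 =>
    if ix ≥ 0 then
      match PySem.List.pyGet? cl ix with
      | none => (ix, e)      -- IndexError in Python (outside Pre_)
      | some v =>
        if pvTruthy e = false then
          pvLoop2 cl f (ix - 1) (if PySem.Chars.isdigit v then some ix else e)
        else
          if pvSep v then (ix, e) else pvLoop2 cl f (ix - 1) e
    else (ix, e)

def deal_with_left_number (Cr : String) (last_number_ix : Option Int) (left_num : Int) (last_A_ix : Int) : String × Bool × Int × Int :=
  let cl := Cr.toList
  match last_number_ix with
  | some lnix =>
    let lni := pvLoop1 cl (lnix.toNat + 2 * cl.length + 2) lnix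
    match PySem.Int.ofChars? (PySem.List.slice cl (some lni) (some (lnix + 1))) with
    | none => (Cr, false, 0, 0)     -- ValueError in Python (outside Pre_)
    | some oldN =>
      let newN := oldN + left_num
      let extra : Int := ((PySem.Int.toChars newN).length : Int) - ((PySem.Int.toChars oldN).length : Int)
      (String.ofList (PySem.List.slice cl none (some lni) ++ PySem.Int.toChars newN ++ PySem.List.slice cl (some (lnix + 1)) none), true, extra, lni)
  | none =>
    if last_A_ix ≠ 0 then
      let r := pvLoop2 cl (last_A_ix.toNat + 1) last_A_ix none
      if pvTruthy r.2 then
        let eix := r.2.getD 0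
        match PySem.Int.ofChars? (PySem.List.slice cl (some (r.1 + 1)) (some (eix + 1))) with
        | none => (Cr, false, 0, 0) -- ValueError in Python (outside Pre_)
        | some oldN =>
          let newN := oldN + left_num
          let extra : Int := ((PySem.Int.toChars newN).length : Int) - ((PySem.Int.toChars oldN).length : Int)
          (String.ofList (PySem.List.slice cl none (some (r.1 + 1)) ++ PySem.Int.toChars newN ++ PySem.List.slice cl (some (eix + 1)) none), true, extra, r.1)
      else (Cr, false, 0, 0)
    else (Cr, false, 0, 0)

-- ===== PORT B =====

/-- One step of B's forward scan: state is (span of last digit run seen, start of current run). -/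
def pvStep (st : Option (Int × Int) × Option Int) (p : Int × Char) : Option (Int × Int) × Option Int :=
  if PySem.Chars.isdigit p.2 then
    let rs := st.2.getD p.1
    (some (rs, p.1 + 1), some rs)
  else
    (st.1, none)

def deal_with_left_number_alt (Cr : String) (last_number_ix : Option Int) (left_num : Int) (last_A_ix : Int) : String × Bool × Int × Int :=
  let cl := Cr.toList
  let endIx? : Option Int :=
    match last_number_ix with
    | some lnix => some lnix
    | none => if last_A_ix > 0 then some last_A_ix else none
  match endIx? with
  | none => (Cr, false, 0, 0)
  | some endIx =>
    let pre := PySem.List.slice cl none (some (endIx + 1))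
    let st := (PySem.List.enumerate pre 0).foldl pvStep (none, none)
    match st.1 with
    | none => (Cr, false, 0, 0)   -- branch 2's no-number fall-through; on branch 1 Python B raises ValueError here (outside Pre_)
    | some (lo, hi) =>
      match PySem.Int.ofChars? (PySem.List.slice pre (some lo) (some hi)) with
      | none => (Cr, false, 0, 0)   -- ValueError in Python (outside Pre_)
      | some oldN =>
        let newN := oldN + left_num
        let extra : Int := ((PySem.Int.toChars newN).length : Int) - ((PySem.Int.toChars oldN).length : Int)
        (String.ofList (PySem.List.slice cl none (some lo) ++ PySem.Int.toChars newN ++ PySem.List.slice cl (some hi) none),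
         true, extra,
         match last_number_ix with | some _ => lo | none => lo - 1)

-- ===== PRECONDITION & SPEC =====

-- Pre_ excludes the inputs where A raises (IndexError walking past the ends, ValueError from int()),
-- where A's result depends on Python's negative-index/past-the-end slicing accidents (negative
-- last_number_ix, or last_number_ix = len(Cr)), and where the slice A feeds to int() is accepted
-- only by int()'s lenient parsing (signs/whitespace, e.g. '+5' or ' 5') instead of being a plain
-- digit run — on those corners A's span and returned index are artefacts of its two scans.
def Pre_deal_with_left_number (Cr : String) (last_number_ix : Option Int) (left_num : Int) (last_A_ix : Int) : Prop :=
  match last_number_ix with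
  | some lnix =>
      -- the characters Cr[j..last_number_ix] are a digit run preceded by ',' or '['
      ∃ j : Nat, j < Cr.toList.length ∧ 1 ≤ j ∧ (j : Int) ≤ lnix ∧ lnix < (Cr.toList.length : Int) ∧
        pvSep (Cr.toList.getD (j - 1) ' ') = true ∧
        (∀ i : Nat, i < Cr.toList.length → ((j ≤ i ∧ (i : Int) ≤ lnix) → PySem.Chars.isdigit (Cr.toList.getD i ' ') = true))
  | none =>
      last_A_ix ≤ 0 ∨
      (last_A_ix < (Cr.toList.length : Int) ∧
        ((∀ i : Nat, i < Cr.toList.length → ((i : Int) ≤ last_A_ix → PySem.Chars.isdigit (Cr.toList.getD i ' ') = false)) ∨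
         (∃ e : Nat, e < Cr.toList.length ∧ (e : Int) ≤ last_A_ix ∧ PySem.Chars.isdigit (Cr.toList.getD e ' ') = true ∧
           (∀ i : Nat, i < Cr.toList.length → ((e < i ∧ (i : Int) ≤ last_A_ix) → PySem.Chars.isdigit (Cr.toList.getD i ' ') = false)) ∧
           ((∀ i : Nat, i < e → PySem.Chars.isdigit (Cr.toList.getD i ' ') = true) ∨
            (∃ s : Nat, s < e ∧ pvSep (Cr.toList.getD s ' ') = true ∧
              (∀ i : Nat, i < e → (s < i → PySem.Chars.isdigit (Cr.toList.getD i ' ') = true)))))))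

instance (Cr : String) (last_number_ix : Option Int) (left_num : Int) (last_A_ix : Int) : Decidable (Pre_deal_with_left_number Cr last_number_ix left_num last_A_ix) := by unfold Pre_deal_with_left_number; cases last_number_ix <;> infer_instance

def pvWitness_deal_with_left_number : String × Option Int × Int × Int := ("[3,4]", some 3, 2, 0)

-- When the only number at or before last_A_ix ends at string index 0, A finds it but its
-- `if end_ix:` truthiness test treats the found position 0 as "not found", so A returns
-- (Cr, False, 0, 0); B adds left_num to that number and returns the patched string with
-- index -1, which is the intended "add to the preceding number" behaviour.
def D_deal_with_left_number (Cr : String) (last_number_ix : Option Int) (left_num : Int) (last_A_ix : Int) : Prop :=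
  last_number_ix = none ∧ 0 < last_A_ix ∧ last_A_ix < (Cr.toList.length : Int) ∧
  PySem.Chars.isdigit (Cr.toList.getD 0 ' ') = true ∧
  (∀ i : Nat, i < Cr.toList.length → ((1 ≤ i ∧ (i : Int) ≤ last_A_ix) → PySem.Chars.isdigit (Cr.toList.getD i ' ') = false))

instance (Cr : String) (last_number_ix : Option Int) (left_num : Int) (last_A_ix : Int) : Decidable (D_deal_with_left_number Cr last_number_ix left_num last_A_ix) := by unfold D_deal_with_left_number; infer_instance

def Spec_deal_with_left_number (Cr : String) (last_number_ix : Option Int) (left_num : Int) (last_A_ix : Int) (out : String × Bool × Int × Int) : Prop := ¬ D_deal_with_left_number Cr last_number_ix left_num last_A_ix → out = deal_with_left_number_alt Cr last_number_ix left_num last_A_ix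
instance (Cr : String) (last_number_ix : Option Int) (left_num : Int) (last_A_ix : Int) (out : String × Bool × Int × Int) : Decidable (Spec_deal_with_left_number Cr last_number_ix left_num last_A_ix out) := by unfold Spec_deal_with_left_number; infer_instance

def pvDiffWitness_deal_with_left_number : String × Option Int × Int × Int := ("7]", none, 1, 1)
def pvDiffWitnessOut_deal_with_left_number : (String × Bool × Int × Int) × (String × Bool × Int × Int) := (("7]", false, 0, 0), ("8]", true, 0, -1))

-- ===== CLAIM (what is proved, stated in full; the proofs are below) =====
def Claim_unchanged_deal_with_left_number : Prop := ∀ (Cr : String) (last_number_ix : Option Int) (left_num : Int) (last_A_ix : Int), Dom_deal_with_left_number Cr last_number_ix left_num last_A_ix → Pre_deal_with_left_number Cr last_number_ix left_num last_A_ix → Spec_deal_with_left_number Cr last_number_ix left_num last_A_ix (deal_with_left_number Cr last_number_ix left_num last_A_ix)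
def Claim_changed_deal_with_left_number : Prop := Dom_deal_with_left_number (pvDiffWitness_deal_with_left_number.1) (pvDiffWitness_deal_with_left_number.2.1) (pvDiffWitness_deal_with_left_number.2.2.1) (pvDiffWitness_deal_with_left_number.2.2.2) ∧ Pre_deal_with_left_number (pvDiffWitness_deal_with_left_number.1) (pvDiffWitness_deal_with_left_number.2.1) (pvDiffWitness_deal_with_left_number.2.2.1) (pvDiffWitness_deal_with_left_number.2.2.2) ∧ D_deal_with_left_number (pvDiffWitness_deal_with_left_number.1) (pvDiffWitness_deal_with_left_number.2.1) (pvDiffWitness_deal_with_left_number.2.2.1) (pvDiffWitness_deal_with_left_number.2.2.2) ∧ deal_with_left_number (pvDiffWitness_deal_with_left_number.1) (pvDiffWitness_deal_with_left_number.2.1) (pvDiffWitness_deal_with_left_number.2.2.1) (pvDiffWitness_deal_with_left_number.2.2.2) = pvDiffWitnessOut_deal_with_left_number.1 ∧ deal_with_left_number_alt (pvDiffWitness_deal_with_left_number.1) (pvDiffWitness_deal_with_left_number.2.1) (pvDiffWitness_deal_with_left_number.2.2.1) (pvDiffWitness_deal_with_left_number.2.2.2) = pvDiffWitnessOut_deal_with_left_number.2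 ∧ pvDiffWitnessOut_deal_with_left_number.1 ≠ pvDiffWitnessOut_deal_with_left_number.2
def Claim_exact_deal_with_left_number : Prop := ∀ (Cr : String) (last_number_ix : Option Int) (left_num : Int) (last_A_ix : Int), Dom_deal_with_left_number Cr last_number_ix left_num last_A_ix → Pre_deal_with_left_number Cr last_number_ix left_num last_A_ix → D_deal_with_left_number Cr last_number_ix left_num last_A_ix → deal_with_left_number Cr last_number_ix left_num last_A_ix ≠ deal_with_left_number_alt Cr last_number_ix left_num last_A_ix

-- ===== LEMMAS AND PROOFS =====

theorem pvSep_not_digit (c : Char) (h : pvSep c = true) : PySem.Chars.isdigit c = false := by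
  simp [pvSep] at h
  rcases h with rfl | rfl <;> decide

theorem digit_not_sep (c : Char) (h : PySem.Chars.isdigit c = true) : pvSep c = false := by
  cases hs : pvSep c
  · rfl
  · rw [pvSep_not_digit c hs] at h; cases h

theorem digit_char_cases (c : Char) (h : PySem.Chars.isdigit c = true) :
    c = '0' ∨ c = '1' ∨ c = '2' ∨ c = '3' ∨ c = '4' ∨ c = '5' ∨ c = '6' ∨ c = '7' ∨ c = '8' ∨ c = '9' := by
  simp [PySem.Chars.isdigit] at h
  obtain ⟨h1, h2⟩ := h
  have h1' : 48 ≤ c.toNat := h1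
  have h2' : c.toNat ≤ 57 := h2
  have mk : ∀ {d : Char}, c.toNat = d.toNat → c = d := fun h => Char.ext (UInt32.toNat_inj.mp h)
  have hd : c.toNat = 48 ∨ c.toNat = 49 ∨ c.toNat = 50 ∨ c.toNat = 51 ∨ c.toNat = 52 ∨ c.toNat = 53 ∨ c.toNat = 54 ∨ c.toNat = 55 ∨ c.toNat = 56 ∨ c.toNat = 57 := by omega
  rcases hd with h|h|h|h|h|h|h|h|h|h
  · exact Or.inl (mk h)
  · exact Or.inr <| Or.inl (mk h)
  · exact Or.inr <| Or.inr <| Or.inl (mk h)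
  · exact Or.inr <| Or.inr <| Or.inr <| Or.inl (mk h)
  · exact Or.inr <| Or.inr <| Or.inr <| Or.inr <| Or.inl (mk h)
  · exact Or.inr <| Or.inr <| Or.inr <| Or.inr <| Or.inr <| Or.inl (mk h)
  · exact Or.inr <| Or.inr <| Or.inr <| Or.inr <| Or.inr <| Or.inr <| Or.inl (mk h)
  · exact Or.inr <| Or.inr <| Or.inr <| Or.inr <| Or.inr <| Or.inr <| Or.inr <| Or.inl (mk h)
  · exact Or.inr <| Or.inr <| Or.inr <| Or.inr <| Or.inr <| Or.inr <| Or.inr <| Or.inr <| Or.inl (mk h)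
  · exact Or.inr <| Or.inr <| Or.inr <| Or.inr <| Or.inr <| Or.inr <| Or.inr <| Or.inr <| Or.inr (mk h)

theorem digit_ofChars_isSome (c : Char) (h : PySem.Chars.isdigit c = true) :
    (PySem.Int.ofChars? [c]).isSome = true := by
  rcases digit_char_cases c h with rfl|rfl|rfl|rfl|rfl|rfl|rfl|rfl|rfl|rfl <;> decide

theorem pvLoop1_eq (cl : List Char) (j : Nat) (hj1 : 1 ≤ j)
    (hsep : pvSep (cl.getD (j - 1) ' ') = true) :
    ∀ (fuel : Nat) (lni : Int), (j : Int) ≤ lni → lni < (cl.length : Int) →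
      (∀ i : Nat, j ≤ i → (i : Int) < lni → pvSep (cl.getD i ' ') = false) →
      ((lni - j).toNat < fuel) →
      pvLoop1 cl fuel lni = (j : Int) := by
  intro fuel
  induction fuel with
  | zero => intro lni h1 h2 h3 h4; omega
  | succ f ih =>
    intro lni h1 h2 h3 h4
    have hj0 : (0 : Int) ≤ lni - 1 := by omega
    have hjlt : lni - 1 < (cl.length : Int) := by omega
    have hget := PySem.List.pyGet?_eq_some_getElem (xs := cl) (i := lni - 1) hj0 hjlt
    by_cases hlj : lni = (j : Int)
    · subst hlj
      have hidx : (((j : Int)) - 1).toNat = j - 1 := by omega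
      simp only [pvLoop1, hget, hidx]
      have hgd : cl[j - 1]'(by omega) = cl.getD (j - 1) ' ' := (List.getD_eq_getElem _ _ (by omega)).symm
      rw [hgd, hsep]
      simp
    · have hjlt2 : (j : Int) < lni := lt_of_le_of_ne h1 (fun hh => hlj hh.symm)
      have hile : j ≤ (lni - 1).toNat := by omega
      have hilt : ((lni - 1).toNat : Int) < lni := by omega
      have hsepf := h3 (lni - 1).toNat hile hilt
      simp only [pvLoop1, hget]
      have hgd : cl[(lni - 1).toNat]'(by omega) = cl.getD (lni - 1).toNat ' ' := (List.getD_eq_getElem _ _ (by omega)).symm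
      rw [hgd, hsepf]
      simp only [Bool.false_eq_true, if_false]
      exact ih (lni - 1) (by omega) (by omega) (fun i hi1 hi2 => h3 i hi1 (by omega)) (by omega)

theorem pvLoop2_neg (cl : List Char) (fuel : Nat) (e : Option Int) :
    pvLoop2 cl fuel (-1) e = (-1, e) := by
  cases fuel <;> simp [pvLoop2]

theorem pvLoop2_nodigit (cl : List Char) :
    ∀ (fuel : Nat) (ix : Int), -1 ≤ ix → ix < (cl.length : Int) →
      (∀ i : Nat, (i : Int) ≤ ix → PySem.Chars.isdigit (cl.getD i ' ') = false) →
      (ix + 1 ≤ (fuel : Int)) →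
      pvLoop2 cl fuel ix none = (-1, none) := by
  intro fuel
  induction fuel with
  | zero =>
    intro ix h1 h2 h3 h4
    have : ix = -1 := by omega
    subst this
    simp [pvLoop2]
  | succ f ih =>
    intro ix h1 h2 h3 h4
    by_cases hneg : ix = -1
    · subst hneg; exact pvLoop2_neg cl _ none
    · have hix0 : (0 : Int) ≤ ix := by omega
      have hget := PySem.List.pyGet?_eq_some_getElem (xs := cl) (i := ix) hix0 h2
      simp only [pvLoop2, ge_iff_le, hix0, if_pos, hget]
      have hgd : cl[ix.toNat]'(by omega) = cl.getD ix.toNat ' ' := (List.getD_eq_getElem _ _ (by omega)).symm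
      have hdig := h3 ix.toNat (by omega)
      rw [hgd, hdig]
      simp only [pvTruthy, Bool.false_eq_true, if_false, if_true]
      exact ih (ix - 1) (by omega) (by omega) (fun i hi => h3 i (by omega)) (by omega)

theorem pvLoop2_phase2 (cl : List Char) (eI : Int) (he : eI ≠ 0) (t : Int) (ht1 : -1 ≤ t)
    (hts : t = -1 ∨ pvSep (cl.getD t.toNat ' ') = true) :
    ∀ (fuel : Nat) (ix : Int), t ≤ ix → ix < (cl.length : Int) →
      (∀ i : Nat, t < (i : Int) → (i : Int) ≤ ix → pvSep (cl.getD i ' ') = false) →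
      (ix + 1 ≤ (fuel : Int)) →
      pvLoop2 cl fuel ix (some eI) = (t, some eI) := by
  intro fuel
  induction fuel with
  | zero =>
    intro ix h1 h2 h3 h4
    have hix : ix = -1 := by omega
    have ht : t = -1 := by omega
    subst hix; subst ht
    simp [pvLoop2]
  | succ f ih =>
    intro ix h1 h2 h3 h4
    by_cases hneg : ix < 0
    · have hix : ix = -1 := by omega
      have ht : t = -1 := by omega
      subst hix; subst ht
      exact pvLoop2_neg cl _ _
    · have hix0 : (0 : Int) ≤ ix := by omega
      have hget := PySem.List.pyGet?_eq_some_getElem (xs := cl) (i := ix) hix0 h2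
      have htr : pvTruthy (some eI) = true := by simp [pvTruthy, he]
      simp only [pvLoop2, ge_iff_le, hix0, if_pos, hget, htr]
      have hgd : cl[ix.toNat]'(by omega) = cl.getD ix.toNat ' ' := (List.getD_eq_getElem _ _ (by omega)).symm
      by_cases hit : ix = t
      · rcases hts with h | h
        · omega
        · have hnat : ix.toNat = t.toNat := by rw [hit]
          rw [hgd, hnat, h]
          simp [hit]
      · have hlt : t < ix := by omega
        have hsepf := h3 ix.toNat (by omega) (by omega)
        rw [hgd, hsepf]
        simp only [Bool.true_eq_false, Bool.false_eq_true, if_false]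
        exact ih (ix - 1) (by omega) (by omega) (fun i hi1 hi2 => h3 i hi1 (by omega)) (by omega)

theorem pvLoop2_main (cl : List Char) (e : Nat) (t : Int) (ht1 : -1 ≤ t) (ht2 : t < (e : Int))
    (hts : t = -1 ∨ pvSep (cl.getD t.toNat ' ') = true)
    (htd : ∀ i : Nat, t < (i : Int) → i < e → PySem.Chars.isdigit (cl.getD i ' ') = true)
    (hed : PySem.Chars.isdigit (cl.getD e ' ') = true)
    (helen : e < cl.length) :
    ∀ (fuel : Nat) (ix : Int), (e : Int) ≤ ix → ix < (cl.length : Int) →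
      (∀ i : Nat, (e : Int) < (i : Int) → (i : Int) ≤ ix → PySem.Chars.isdigit (cl.getD i ' ') = false) →
      (ix + 1 ≤ (fuel : Int)) →
      pvLoop2 cl fuel ix none = (t, some (e : Int)) := by
  intro fuel
  induction fuel with
  | zero => intro ix h1 h2 h3 h4; omega
  | succ f ih =>
    intro ix h1 h2 h3 h4
    have hix0 : (0 : Int) ≤ ix := by omega
    have hget := PySem.List.pyGet?_eq_some_getElem (xs := cl) (i := ix) hix0 h2
    simp only [pvLoop2, ge_iff_le, hix0, if_pos, hget]
    have hgd : cl[ix.toNat]'(by omega) = cl.getD ix.toNat ' ' := (List.getD_eq_getElem _ _ (by omega)).symm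
    simp only [pvTruthy, if_true]
    by_cases hie : ix = (e : Int)
    · have hnat : ix.toNat = e := by omega
      rw [hgd, hnat, hed]
      simp only [if_true]
      rw [hie]
      by_cases he0 : e = 0
      · have hm1 : (e : Int) - 1 = -1 := by omega
        rw [hm1, pvLoop2_neg]
        have ht : t = -1 := by omega
        rw [ht]
      · have heI : (e : Int) ≠ 0 := by omega
        exact pvLoop2_phase2 cl (e : Int) heI t ht1 hts f ((e : Int) - 1) (by omega) (by omega)
          (fun i hi1 hi2 => digit_not_sep _ (htd i hi1 (by omega))) (by omega)
    · have hgt : (e : Int) < ix := by omega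
      have hdigf := h3 ix.toNat (by omega) (by omega)
      rw [hgd, hdigf]
      simp only [Bool.false_eq_true, if_false]
      exact ih (ix - 1) (by omega) (by omega) (fun i hi1 hi2 => h3 i hi1 (by omega)) (by omega)

theorem pvScan_nondigit (w : List Char) :
    ∀ (s : Int) (st : Option (Int × Int) × Option Int),
      (∀ c ∈ w, PySem.Chars.isdigit c = false) →
      (PySem.List.enumerate w s).foldl pvStep st = (st.1, if w = [] then st.2 else none) := by
  induction w with
  | nil => intro s st _; simp [PySem.List.enumerate_nil]
  | cons c w ih =>
    intro s st hw
    rw [PySem.List.enumerate_cons, List.foldl_cons]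
    have hc : PySem.Chars.isdigit c = false := hw c (by simp)
    have hstep : pvStep st (s, c) = (st.1, none) := by simp [pvStep, hc]
    rw [hstep, ih (s + 1) (st.1, none) (fun d hd => hw d (by simp [hd]))]
    cases w <;> simp

theorem pvScan_digitrun (v : List Char) :
    ∀ (k j : Int), (∀ c ∈ v, PySem.Chars.isdigit c = true) →
      (PySem.List.enumerate v j).foldl pvStep (some (k, j), some k) = (some (k, j + v.length), some k) := by
  induction v with
  | nil => intro k j _; simp [PySem.List.enumerate_nil]
  | cons c v ih =>
    intro k j hv
    rw [PySem.List.enumerate_cons, List.foldl_cons]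
    have hc : PySem.Chars.isdigit c = true := hv c (by simp)
    have hstep : pvStep (some (k, j), some k) (j, c) = (some (k, j + 1), some k) := by
      simp [pvStep, hc]
    rw [hstep, ih k (j + 1) (fun d hd => hv d (by simp [hd]))]
    have harith : j + 1 + (v.length : Int) = j + ((c :: v).length : Int) := by
      simp only [List.length_cons]; push_cast; ring
    rw [harith]

theorem pvScan_start (v : List Char) (hv0 : v ≠ []) (hv : ∀ c ∈ v, PySem.Chars.isdigit c = true)
    (k : Int) (sp : Option (Int × Int)) :
    (PySem.List.enumerate v k).foldl pvStep (sp, none) = (some (k, k + v.length), some k) := by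
  match v, hv0 with
  | c :: v, _ =>
    rw [PySem.List.enumerate_cons, List.foldl_cons]
    have hc : PySem.Chars.isdigit c = true := hv c (by simp)
    have hstep : pvStep (sp, none) (k, c) = (some (k, k + 1), some k) := by
      simp [pvStep, hc]
    rw [hstep, pvScan_digitrun v k (k + 1) (fun d hd => hv d (by simp [hd]))]
    have harith : k + 1 + (v.length : Int) = k + ((c :: v).length : Int) := by
      simp only [List.length_cons]; push_cast; ring
    rw [harith]

theorem pvScan_main (u v w : List Char) (hv0 : v ≠ [])
    (hv : ∀ c ∈ v, PySem.Chars.isdigit c = true)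
    (hw : ∀ c ∈ w, PySem.Chars.isdigit c = false)
    (hu : u = [] ∨ ∃ u' c, u = u' ++ [c] ∧ PySem.Chars.isdigit c = false) :
    ((PySem.List.enumerate (u ++ v ++ w) 0).foldl pvStep (none, none)).1
      = some ((u.length : Int), (u.length : Int) + v.length) := by
  rw [List.append_assoc, PySem.List.enumerate_append, List.foldl_append]
  have hu2 : ∃ X, (PySem.List.enumerate u (0 : Int)).foldl pvStep (none, none) = (X, none) := by
    rcases hu with rfl | ⟨u', c, rfl, hcd⟩
    · exact ⟨none, by simp [PySem.List.enumerate_nil]⟩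
    · rw [PySem.List.enumerate_append, List.foldl_append]
      refine ⟨((PySem.List.enumerate u' (0 : Int)).foldl pvStep (none, none)).1, ?_⟩
      simp [PySem.List.enumerate_cons, PySem.List.enumerate_nil, pvStep, hcd]
  obtain ⟨X, hX⟩ := hu2
  rw [hX, PySem.List.enumerate_append, List.foldl_append, zero_add]
  rw [pvScan_start v hv0 hv (u.length : Int) X]
  rw [pvScan_nondigit w ((u.length : Int) + v.length) _ hw]

theorem pvBranch1_eq (Cr : String) (ln laix lnix : Int) (j : Nat)
    (hj1 : 1 ≤ j) (hjle : (j : Int) ≤ lnix) (hlt : lnix < (Cr.toList.length : Int))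
    (hsep : pvSep (Cr.toList.getD (j - 1) ' ') = true)
    (hdig : ∀ i : Nat, j ≤ i → (i : Int) ≤ lnix → PySem.Chars.isdigit (Cr.toList.getD i ' ') = true) :
    deal_with_left_number Cr (some lnix) ln laix = deal_with_left_number_alt Cr (some lnix) ln laix := by
  set cl := Cr.toList with hcl
  have hjlen : j < cl.length := by omega
  have hloop : pvLoop1 cl (lnix.toNat + 2 * cl.length + 2) lnix = (j : Int) :=
    pvLoop1_eq cl j hj1 hsep _ lnix hjle hlt
      (fun i hi1 hi2 => digit_not_sep _ (hdig i hi1 (by omega))) (by omega)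
  set M := lnix.toNat + 1 with hM
  have hMlen : M ≤ cl.length := by omega
  have hjM : j ≤ M := by omega
  set vv := (cl.drop j).take (M - j) with hvv
  have hprefix : PySem.List.slice cl none (some (lnix + 1)) = cl.take M := by
    rw [PySem.List.slice_to cl (by omega)]
    congr 1
    omega
  have hsplit : cl.take M = cl.take j ++ vv := by
    rw [hvv, ← List.take_add]
    congr 1
    omega
  have hul : (cl.take j).length = j := by simp [List.length_take]; omega
  have hvl : vv.length = M - j := by simp [hvv]; omega
  have hvne : vv ≠ [] := by
    intro h
    have := congrArg List.length h
    rw [hvl] at this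
    simp at this
    omega
  have hvdig : ∀ c ∈ vv, PySem.Chars.isdigit c = true := by
    intro c hc
    obtain ⟨k, hk, hke⟩ := List.mem_iff_getElem.mp hc
    have hkv : k < M - j := by rw [hvl] at hk; exact hk
    have h1 : vv[k]'hk = cl[j + k]'(by omega) := by
      simp [hvv, List.getElem_take, List.getElem_drop]
    have h2 := hdig (j + k) (by omega) (by omega)
    rw [List.getD_eq_getElem cl ' ' (by omega)] at h2
    rw [← hke, h1]
    exact h2
  have hu : ∃ u' c0, cl.take j = u' ++ [c0] ∧ PySem.Chars.isdigit c0 = false := by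
    refine ⟨cl.take (j - 1), cl[j - 1]'(by omega), ?_, ?_⟩
    · rw [← List.take_succ_eq_append_getElem (by omega)]
      congr 1
      omega
    · apply pvSep_not_digit
      rw [List.getD_eq_getElem cl ' ' (by omega)] at hsep
      exact hsep
  have hscan := pvScan_main (cl.take j) vv [] hvne hvdig (by simp) (Or.inr hu)
  rw [List.append_nil] at hscan
  rw [hul] at hscan
  have harith : ((j : Int), (j : Int) + ((M - j : Nat) : Int)) = ((j : Int), lnix + 1) := by
    have : (j : Int) + ((M - j : Nat) : Int) = lnix + 1 := by omega
    rw [this]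
  rw [hvl, harith] at hscan
  rw [← hsplit, ← hprefix] at hscan
  have hparseA : PySem.List.slice cl (some (j : Int)) (some (lnix + 1)) = vv := by
    rw [PySem.List.slice_toNat cl (by omega) (by omega), hvv]
    have h0 : ((j : Int)).toNat = j := by omega
    have h1 : (lnix + 1).toNat - (j : Int).toNat = M - j := by omega
    rw [h1, h0]
  have hparseB : PySem.List.slice (PySem.List.slice cl none (some (lnix + 1))) (some (j : Int)) (some (lnix + 1)) = vv := by
    rw [hprefix, PySem.List.slice_toNat (List.take M cl) (by omega) (by omega), List.drop_take, List.take_take]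
    have h0 : ((j : Int)).toNat = j := by omega
    rw [h0]
    have h1 : (lnix + 1).toNat - j = M - j := by omega
    rw [h1, min_self, hvv]
  simp only [deal_with_left_number, deal_with_left_number_alt, ← hcl, hloop, hscan, hparseA, hparseB]

theorem pvBranch2_eq (Cr : String) (ln laix : Int) (e : Nat) (t : Int)
    (hl0 : 0 < laix) (hlt : laix < (Cr.toList.length : Int))
    (he1 : 1 ≤ e) (hele : (e : Int) ≤ laix)
    (hed : PySem.Chars.isdigit (Cr.toList.getD e ' ') = true)
    (habove : ∀ i : Nat, (e : Int) < (i : Int) → (i : Int) ≤ laix → PySem.Chars.isdigit (Cr.toList.getD i ' ') = false)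
    (ht1 : -1 ≤ t) (ht2 : t < (e : Int))
    (hts : t = -1 ∨ pvSep (Cr.toList.getD t.toNat ' ') = true)
    (htd : ∀ i : Nat, t < (i : Int) → i < e → PySem.Chars.isdigit (Cr.toList.getD i ' ') = true) :
    deal_with_left_number Cr none ln laix = deal_with_left_number_alt Cr none ln laix := by
  set cl := Cr.toList with hcl
  have helen : e < cl.length := by omega
  have hloop : pvLoop2 cl (laix.toNat + 1) laix none = (t, some (e : Int)) :=
    pvLoop2_main cl e t ht1 ht2 hts htd hed helen _ laix hele hlt habove (by omega)
  set M := laix.toNat + 1 with hM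
  set T := (t + 1).toNat with hT
  have hTe : T ≤ e := by omega
  have hMlen : M ≤ cl.length := by omega
  have heM : e + 1 ≤ M := by omega
  set vv := (cl.drop T).take (e + 1 - T) with hvv
  set ww := (cl.take M).drop (e + 1) with hww
  have hprefix : PySem.List.slice cl none (some (laix + 1)) = cl.take M := by
    rw [PySem.List.slice_to cl (by omega)]
    congr 1
    omega
  have hsplit : cl.take M = cl.take T ++ vv ++ ww := by
    have h1 : cl.take (e + 1) = cl.take T ++ vv := by
      rw [hvv, ← List.take_add]
      congr 1
      omega
    have h2 : (cl.take M).take (e + 1) = cl.take (e + 1) := by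
      rw [List.take_take]
      congr 1
      omega
    calc cl.take M = (cl.take M).take (e + 1) ++ (cl.take M).drop (e + 1) := (List.take_append_drop _ _).symm
      _ = cl.take T ++ vv ++ ww := by rw [h2, h1, hww]
  have hul : (cl.take T).length = T := by simp [List.length_take]; omega
  have hvl : vv.length = e + 1 - T := by simp [hvv]; omega
  have hvne : vv ≠ [] := by
    intro h
    have := congrArg List.length h
    rw [hvl] at this
    simp at this
    omega
  have hvdig : ∀ c ∈ vv, PySem.Chars.isdigit c = true := by
    intro c hc
    obtain ⟨k, hk, hke⟩ := List.mem_iff_getElem.mp hc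
    have hkv : k < e + 1 - T := by rw [hvl] at hk; exact hk
    have h1 : vv[k]'hk = cl[T + k]'(by omega) := by
      simp [hvv, List.getElem_take, List.getElem_drop]
    by_cases hie : T + k = e
    · rw [← hke, h1]
      rw [List.getD_eq_getElem cl ' ' (by omega)] at hed
      simpa [hie] using hed
    · have h2 := htd (T + k) (by omega) (by omega)
      rw [List.getD_eq_getElem cl ' ' (by omega)] at h2
      rw [← hke, h1]
      exact h2
  have hwnd : ∀ c ∈ ww, PySem.Chars.isdigit c = false := by
    intro c hc
    obtain ⟨k, hk, hke⟩ := List.mem_iff_getElem.mp hc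
    have hkl : e + 1 + k < M := by
      have := hk
      simp [hww] at this
      omega
    have h1 : ww[k]'hk = cl[e + 1 + k]'(by omega) := by
      simp [hww, List.getElem_take, List.getElem_drop]
    have h2 := habove (e + 1 + k) (by push_cast; omega) (by push_cast; omega)
    rw [List.getD_eq_getElem cl ' ' (by omega)] at h2
    rw [← hke, h1]
    exact h2
  have hu : cl.take T = [] ∨ ∃ u' c0, cl.take T = u' ++ [c0] ∧ PySem.Chars.isdigit c0 = false := by
    by_cases htneg : t = -1
    · left
      have : T = 0 := by omega
      rw [this]
      simp
    · have hsep := hts.resolve_left htneg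
      have ht0 : 0 ≤ t := by omega
      right
      have htn : t.toNat < cl.length := by omega
      refine ⟨cl.take t.toNat, cl[t.toNat]'htn, ?_, ?_⟩
      · rw [← List.take_succ_eq_append_getElem htn]
        congr 1
        omega
      · apply pvSep_not_digit
        rw [List.getD_eq_getElem cl ' ' htn] at hsep
        exact hsep
  have hscan := pvScan_main (cl.take T) vv ww hvne hvdig hwnd hu
  rw [hul, hvl] at hscan
  have hTi : (T : Int) = t + 1 := by omega
  rw [hTi] at hscan
  have hsum : t + 1 + ((e + 1 - T : Nat) : Int) = (e : Int) + 1 := by omega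
  rw [hsum] at hscan
  rw [← hsplit, ← hprefix] at hscan
  have hparseA : PySem.List.slice cl (some (t + 1)) (some ((e : Int) + 1)) = vv := by
    rw [PySem.List.slice_toNat cl (by omega) (by omega), hvv]
    have h0 : ((e : Int) + 1).toNat - (t + 1).toNat = e + 1 - T := by omega
    rw [h0]
  have hparseB : PySem.List.slice (PySem.List.slice cl none (some (laix + 1))) (some (t + 1)) (some ((e : Int) + 1)) = vv := by
    rw [hprefix, PySem.List.slice_toNat (List.take M cl) (by omega) (by omega), List.drop_take, List.take_take]
    have h0 : ((e : Int) + 1).toNat - (t + 1).toNat = e + 1 - T := by omega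
    have h1 : M - (t + 1).toNat = M - T := by omega
    rw [h0, h1]
    have h2 : min (e + 1 - T) (M - T) = e + 1 - T := by omega
    rw [h2, hvv]
  have hne : laix ≠ 0 := by omega
  have htrue : pvTruthy (some ((e : Int))) = true := by
    simp [pvTruthy]
    omega
  simp only [deal_with_left_number, deal_with_left_number_alt, ← hcl]
  rw [if_pos hne, if_pos hl0, ← hM]
  simp only [hloop, hscan, htrue, Option.getD_some, add_sub_cancel_right, hparseA, hparseB]
  simp

theorem pvTrivial_eq (Cr : String) (ln laix : Int) (h : laix ≤ 0) :
    deal_with_left_number Cr none ln laix = deal_with_left_number_alt Cr none ln laix := by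
  by_cases h0 : laix = 0
  · subst h0
    simp [deal_with_left_number, deal_with_left_number_alt]
  · have hneg : laix < 0 := by omega
    have htn : laix.toNat = 0 := by omega
    have hloop : pvLoop2 Cr.toList (laix.toNat + 1) laix none = (laix, none) := by
      rw [htn]
      simp only [pvLoop2]
      rw [if_neg (by omega)]
    simp only [deal_with_left_number, deal_with_left_number_alt]
    rw [if_pos h0, if_neg (show ¬ (laix > 0) by omega), hloop]
    simp [pvTruthy]

theorem pvNoDigit_eq (Cr : String) (ln laix : Int) (hpos : 0 < laix)
    (hlt : laix < (Cr.toList.length : Int))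
    (hnod : ∀ i : Nat, (i : Int) ≤ laix → PySem.Chars.isdigit (Cr.toList.getD i ' ') = false) :
    deal_with_left_number Cr none ln laix = deal_with_left_number_alt Cr none ln laix := by
  set cl := Cr.toList with hcl
  set M := laix.toNat + 1 with hM
  have hloop : pvLoop2 cl (laix.toNat + 1) laix none = (-1, none) :=
    pvLoop2_nodigit cl (laix.toNat + 1) laix (by omega) hlt hnod (by omega)
  have hprefix : PySem.List.slice cl none (some (laix + 1)) = cl.take M := by
    rw [PySem.List.slice_to cl (by omega)]
    congr 1
    omega
  have hcond : ∀ c ∈ cl.take M, PySem.Chars.isdigit c = false := by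
    intro c hc
    obtain ⟨k, hk, hke⟩ := List.mem_iff_getElem.mp hc
    have hkl : k < cl.length ∧ k < M := by
      constructor <;> [skip; skip] <;> (have := hk; simp at this; omega)
    have h1 : (cl.take M)[k]'hk = cl[k]'(hkl.1) := by simp [List.getElem_take]
    have h2 := hnod k (by omega)
    rw [List.getD_eq_getElem cl ' ' hkl.1] at h2
    rw [← hke, h1]
    exact h2
  have hscan : ((PySem.List.enumerate (PySem.List.slice cl none (some (laix + 1))) 0).foldl pvStep (none, none)).1 = none := by
    rw [hprefix, pvScan_nondigit (cl.take M) 0 (none, none) hcond]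
  simp only [deal_with_left_number, deal_with_left_number_alt, ← hcl]
  rw [if_pos (show laix ≠ 0 by omega), if_pos hpos, ← hM, hloop]
  simp only [hscan]
  simp [pvTruthy]

theorem deal_with_left_number_spec : Claim_unchanged_deal_with_left_number := by
  intro Cr lnix? ln laix hDom hPre
  unfold Spec_deal_with_left_number
  intro hnD
  cases lnix? with
  | some lnix =>
    unfold Pre_deal_with_left_number at hPre
    obtain ⟨j, hjlen, hj1, hjle, hlt, hsep, hdig⟩ := hPre
    exact pvBranch1_eq Cr ln laix lnix j hj1 hjle hlt hsep
      (fun i hi1 hi2 => hdig i (by omega) ⟨hi1, hi2⟩)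
  | none =>
    unfold Pre_deal_with_left_number at hPre
    by_cases hpos : 0 < laix
    case neg => exact pvTrivial_eq Cr ln laix (by omega)
    rcases hPre with hle | ⟨hlt, hcases⟩
    · omega
    rcases hcases with hnod | ⟨e, helen, hele, hed, habove, hclean⟩
    · exact pvNoDigit_eq Cr ln laix hpos hlt
        (fun i hi => if hil : i < Cr.toList.length then hnod i hil hi else by
          rw [List.getD_eq_default _ _ (by omega)]
          decide)
    by_cases he0 : e = 0
    · exfalso
      apply hnD
      refine ⟨rfl, hpos, hlt, ?_, ?_⟩
      · rw [← he0]; exact hed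
      · intro i hil ⟨hi1, hi2⟩
        exact habove i hil ⟨by omega, hi2⟩
    · have habove' : ∀ i : Nat, (e : Int) < (i : Int) → (i : Int) ≤ laix → PySem.Chars.isdigit (Cr.toList.getD i ' ') = false := by
        intro i h1 h2
        exact habove i (by omega) ⟨by omega, h2⟩
      rcases hclean with hall | ⟨s, hse, hsep, hsd⟩
      · exact pvBranch2_eq Cr ln laix e (-1) hpos hlt (by omega) hele hed habove'
          (by omega) (by omega) (Or.inl rfl) (fun i hi1 hi2 => hall i hi2)
      · refine pvBranch2_eq Cr ln laix e (s : Int) hpos hlt (by omega) hele hed habove'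
          (by omega) (by omega) (Or.inr ?_) (fun i hi1 hi2 => hsd i hi2 (by omega))
        have : ((s : Int)).toNat = s := by omega
        rw [this]
        exact hsep

theorem deal_with_left_number_changed : Claim_changed_deal_with_left_number := by
  unfold Claim_changed_deal_with_left_number; decide

theorem deal_with_left_number_tight : Claim_exact_deal_with_left_number := by
  intro Cr lnix? ln laix hDom hPre hD
  obtain ⟨hnone, hpos, hlen, hd0, hnd⟩ := hD
  subst hnone
  set cl := Cr.toList with hcl
  have hcl0 : 0 < cl.length := by omega
  set M := laix.toNat + 1 with hM
  have hnd' : ∀ i : Nat, (0 : Int) < (i : Int) → (i : Int) ≤ laix → PySem.Chars.isdigit (cl.getD i ' ') = false := by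
    intro i h1 h2
    exact hnd i (by omega) ⟨by omega, h2⟩
  have hloop : pvLoop2 cl (laix.toNat + 1) laix none = (-1, some 0) := by
    have h := pvLoop2_main cl 0 (-1) (by omega) (by omega) (Or.inl rfl)
      (fun i hi1 hi2 => by omega) (by simpa using hd0) hcl0 (laix.toNat + 1) laix (by omega) hlen
      (fun i hi1 hi2 => hnd' i (by exact_mod_cast hi1) hi2) (by omega)
    simpa using h
  have hA : deal_with_left_number Cr none ln laix = (Cr, false, 0, 0) := by
    simp only [deal_with_left_number, ← hcl]
    rw [if_pos (show laix ≠ 0 by omega), hloop]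
    simp [pvTruthy]
  -- B side: span = (0, 1)
  have hprefix : PySem.List.slice cl none (some (laix + 1)) = cl.take M := by
    rw [PySem.List.slice_to cl (by omega)]
    congr 1
    omega
  set ww := (cl.take M).drop 1 with hww
  have hvne : cl.take 1 ≠ [] := by
    rw [← List.length_pos_iff, List.length_take]
    omega
  have hvdig : ∀ c ∈ cl.take 1, PySem.Chars.isdigit c = true := by
    intro c hc
    obtain ⟨k, hk, hke⟩ := List.mem_iff_getElem.mp hc
    have hk0 : k = 0 := by simp at hk; omega
    have h1 : (cl.take 1)[k]'hk = cl[0]'hcl0 := by simp [List.getElem_take, hk0]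
    rw [List.getD_eq_getElem cl ' ' hcl0] at hd0
    rw [← hke, h1]
    exact hd0
  have hwnd : ∀ c ∈ ww, PySem.Chars.isdigit c = false := by
    intro c hc
    obtain ⟨k, hk, hke⟩ := List.mem_iff_getElem.mp hc
    have hkl : 1 + k < M ∧ 1 + k < cl.length := by
      have := hk
      simp [hww] at this
      omega
    have h1 : ww[k]'hk = cl[1 + k]'(hkl.2) := by
      simp only [hww, List.getElem_drop, List.getElem_take]
    have h2 := hnd' (1 + k) (by push_cast; omega) (by push_cast; omega)
    rw [List.getD_eq_getElem cl ' ' hkl.2] at h2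
    rw [← hke, h1]
    exact h2
  have hsplit : cl.take M = [] ++ cl.take 1 ++ ww := by
    have hm1 : 1 ≤ M := by omega
    have h2 : (cl.take M).take 1 = cl.take 1 := by
      rw [List.take_take]
      congr 1
    calc cl.take M = (cl.take M).take 1 ++ (cl.take M).drop 1 := (List.take_append_drop _ _).symm
      _ = [] ++ cl.take 1 ++ ww := by rw [h2, hww]; simp
  have hscan := pvScan_main [] (cl.take 1) ww hvne hvdig hwnd (Or.inl rfl)
  rw [← hsplit, ← hprefix] at hscan
  have hl1 : (cl.take 1).length = 1 := by rw [List.length_take]; omega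
  rw [hl1] at hscan
  simp only [List.length_nil, Nat.cast_zero, Nat.cast_one, zero_add] at hscan
  have hparseB : PySem.List.slice (PySem.List.slice cl none (some (laix + 1))) (some 0) (some 1) = cl.take 1 := by
    have hm1 : 1 ≤ M := by omega
    rw [hprefix, PySem.List.slice_toNat (List.take M cl) (by omega) (by omega)]
    simp only [Int.toNat_zero, Int.toNat_one, Nat.sub_zero, List.drop_zero, List.take_take]
    congr 1
  have htake1 : cl.take 1 = [cl[0]'hcl0] := by
    rw [List.take_one, List.head?_eq_getElem?, List.getElem?_eq_getElem hcl0]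
    rfl
  have hdg : PySem.Chars.isdigit (cl[0]'hcl0) = true := by
    rw [List.getD_eq_getElem cl ' ' hcl0] at hd0
    exact hd0
  obtain ⟨v, hv⟩ := Option.isSome_iff_exists.mp (digit_ofChars_isSome _ hdg)
  have hB : (deal_with_left_number_alt Cr none ln laix).2.1 = true := by
    simp only [deal_with_left_number_alt, ← hcl]
    rw [if_pos hpos]
    simp only [hscan, hparseB, htake1, hv]
  intro heq
  apply absurd hB
  rw [← heq, hA]
  simp
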